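-- pv_equiv track=rewrite | github.com/pp8817/Algorithm | 프로그래머스/1/172928. 공원 산책/공원 산책.py | solution
-- ===== SOURCE A (Python) =====
-- def solution(park, routes):
--     W = len(park)
--     H = len(park[0])
--
--     x, y = 0,0
--
--     for i in range(W):
--         for j in range(H):
--             if park[i][j] == "S":
--                 x, y = i,j
--                 break
--
--     dic = {"N": [-1,0], "S":[1,0], "W":[0,-1], "E": [0,1]}
--
--     for i in range(len(routes)):
--         d, s = routes[i][0], int(routes[i][2])
--         [dx, dy] = dic[d]
--         nx, ny = x+dx*s, y+dy*s
--
--         if 0<=nx<W and 0<=ny<H: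
--             if promising(x, y, nx, ny, park):
--                 x, y = nx, ny
--     return [x, y]
--
-- def promising(x, y, nx, ny, park):
--     if x == nx:  # 이동 방향이 수평일 때
--         start, end = min(y, ny), max(y, ny)
--         for c in range(start, end + 1):
--             if park[x][c] == "X":
--                 return False
--     else:  # 이동 방향이 수직일 때
--         start, end = min(x, nx), max(x, nx)
--         for r in range(start, end + 1):
--             if park[r][y] == "X":
--                 return False
--     return True
-- ===== SOURCE B (Python) =====
-- def solution(park, routes):
--     W = len(park)
--     H = len(park[0])
--
--     x, y = 0, 0
--     for i in range(W):
--         for j in range(H):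
--             if park[i][j] == "S":
--                 x, y = i, j
--                 break
--
--     deltas = {"N": (-1, 0), "S": (1, 0), "W": (0, -1), "E": (0, 1)}
--
--     for r in routes:
--         dx, dy = deltas[r[0]]
--         s = int(r[2])
--         cx, cy = x, y
--         ok = True
--         for _ in range(s):
--             cx += dx
--             cy += dy
--             if not (0 <= cx < W and 0 <= cy < H) or park[cx][cy] == "X":
--                 ok = False
--                 break
--         if ok:
--             x, y = cx, cy
--     return [x, y]
-- ===== Notes on version B (the rewrite author's own statement) =====
-- stated objective: alternative
-- what changed: Per route B walks cell by cell, committing the move only if every single step stays in bounds and off 'X', instead of A's jump-to-endpoint bounds test followed by a separate min-to-max segment scan in the promising() helper (which disappears).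
-- outside the precondition, e.g. on solution(['XO'], ['E 1']): A returns [0, 0], B returns [0, 1]; on solution(['OO', 'S'], []): A returns [1, 0], B returns [1, 0]
import Mathlib
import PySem

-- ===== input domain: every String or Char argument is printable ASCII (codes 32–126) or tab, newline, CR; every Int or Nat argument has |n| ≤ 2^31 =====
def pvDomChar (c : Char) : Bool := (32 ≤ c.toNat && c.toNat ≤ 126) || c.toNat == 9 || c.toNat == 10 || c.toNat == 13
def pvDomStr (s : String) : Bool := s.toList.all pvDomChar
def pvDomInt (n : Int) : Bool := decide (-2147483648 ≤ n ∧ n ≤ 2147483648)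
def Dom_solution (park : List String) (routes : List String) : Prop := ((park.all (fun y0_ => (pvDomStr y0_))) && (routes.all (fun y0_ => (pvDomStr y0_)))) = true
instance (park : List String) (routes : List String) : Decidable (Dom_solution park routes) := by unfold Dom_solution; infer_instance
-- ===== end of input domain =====

-- B replaces A's jump-to-endpoint bounds check + min-to-max segment scan (promising) by a
-- step-by-step walk that commits the move only if every single step is in bounds and not 'X'.


-- ===== PORT A =====
-- park[i][j] read at an index both programs have already bounds-checked (default unreachable inside Pre_)
def pvCell (park : List String) (i j : Int) : Char :=
  (PySem.List.pyGet? ((PySem.List.pyGet? park i).getD "").toList j).getD ' '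

-- body of the inner scan 'if park[i][j]=="S": x,y=i,j; break' (break = keep the first match)
def pvScanStep (park : List String) (i : Int) (acc : Option Int) (j : Nat) : Option Int :=
  match acc with
  | some v => some v
  | none => if pvCell park i (j : Int) = 'S' then some (j : Int) else none

-- 'for j in range(H)'
def pvRowScan (park : List String) (i : Int) (H : Nat) : Option Int :=
  (List.range H).foldl (pvScanStep park i) none

-- body of the outer scan: the state (x,y) is overwritten by every row that contains an 'S'
def pvFindStep (park : List String) (H : Nat) (p : Int × Int) (i : Nat) : Int × Int :=
  match pvRowScan park (i : Int) H with
  | some j => ((i : Int), j)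
  | none => p

-- 'for i in range(W)', starting from x, y = 0, 0
def pvFindS (park : List String) (W H : Nat) : Int × Int :=
  (List.range W).foldl (pvFindStep park H) (0, 0)

-- dic[d]; a key other than N/S/W/E is a KeyError in Python (excluded by Pre_; default value unreachable there)
def pvDic (d : Char) : Int × Int :=
  if d = 'N' then (-1, 0) else if d = 'S' then (1, 0)
  else if d = 'W' then (0, -1) else if d = 'E' then (0, 1) else (0, 0)

-- int(routes[i][2]): int() of the single character at index 2 (IndexError/ValueError excluded by Pre_)
def pvParse (r : String) : Int :=
  (PySem.Int.ofChars? [(PySem.List.pyGet? r.toList 2).getD ' ']).getD 0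

-- promising(x, y, nx, ny, park): loop with early 'return False' = List.all
def pvPromising (x y nx ny : Int) (park : List String) : Bool :=
  if x = nx then
    (PySem.List.pyRange (min y ny) (max y ny + 1) 1).all (fun c => !(pvCell park x c == 'X'))
  else
    (PySem.List.pyRange (min x nx) (max x nx + 1) 1).all (fun r => !(pvCell park r y == 'X'))

-- body of A's routes loop
def pvStepA (park : List String) (W H : Nat) (p : Int × Int) (r : String) : Int × Int :=
  let d := (PySem.List.pyGet? r.toList 0).getD ' '
  let s := pvParse r
  let dxy := pvDic d
  let nx := p.1 + dxy.1 * s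
  let ny := p.2 + dxy.2 * s
  if 0 ≤ nx ∧ nx < (W : Int) ∧ 0 ≤ ny ∧ ny < (H : Int) then
    if pvPromising p.1 p.2 nx ny park then (nx, ny) else p
  else p

def solution (park : List String) (routes : List String) : List Int :=
  let W := park.length
  let H := ((PySem.List.pyGet? park 0).getD "").toList.length
  let p := routes.foldl (pvStepA park W H) (pvFindS park W H)
  [p.1, p.2]

-- ===== PORT B =====
-- B's deltas dict (tuples); a key other than N/S/W/E is a KeyError (excluded by Pre_)
def pvDeltas (d : Char) : Int × Int :=
  if d = 'N' then (-1, 0) else if d = 'S' then (1, 0)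
  else if d = 'W' then (0, -1) else if d = 'E' then (0, 1) else (0, 0)

-- Source B's inner 'for _ in range(s)' loop: advance one cell at a time, abort on the first bad step;
-- none = aborted (keep old position), some = all steps succeeded.  range(s) runs s.toNat times (exact).
def pvWalk (park : List String) (W H : Nat) (dx dy : Int) : Int → Int → Nat → Option (Int × Int)
  | cx, cy, 0 => some (cx, cy)
  | cx, cy, Nat.succ n =>
    let nx := cx + dx
    let ny := cy + dy
    if 0 ≤ nx ∧ nx < (W : Int) ∧ 0 ≤ ny ∧ ny < (H : Int) then
      if pvCell park nx ny = 'X' then none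
      else pvWalk park W H dx dy nx ny n
    else none

-- body of B's routes loop
def pvStepB (park : List String) (W H : Nat) (p : Int × Int) (r : String) : Int × Int :=
  let dxy := pvDeltas ((PySem.List.pyGet? r.toList 0).getD ' ')
  let s := pvParse r
  match pvWalk park W H dxy.1 dxy.2 p.1 p.2 s.toNat with
  | some q => q
  | none => p

def solution_alt (park : List String) (routes : List String) : List Int :=
  let W := park.length
  let H := ((PySem.List.pyGet? park 0).getD "").toList.length
  let p := routes.foldl (pvStepB park W H) (pvFindS park W H)
  [p.1, p.2]

-- ===== PRECONDITION & SPEC =====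
-- Pre_ excludes: empty park (park[0] raises); parks with a row shorter than park[0] (the scan and the walks
-- index by W×len(park[0]) and can raise there); routes not of the form <N/S/W/E> <any> <digit> …
-- (KeyError/IndexError/ValueError); and, when routes is nonempty, parks whose scanned W×H window has no 'S'
-- while cell (0,0) is 'X' — off the problem's contract (exactly one 'S'), where A's permanent stay at the
-- blocked (0,0) is accidental.
def Pre_solution (park : List String) (routes : List String) : Prop :=
  park ≠ [] ∧
  (∀ r ∈ park, (park.headD "").toList.length ≤ r.toList.length) ∧
  ((∃ r ∈ park, 'S' ∈ r.toList.take ((park.headD "").toList.length)) ∨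
    (park.headD "").toList.headD ' ' ≠ 'X' ∨ routes = []) ∧
  (∀ r ∈ routes, 3 ≤ r.toList.length ∧
     (PySem.List.pyGet? r.toList 0).getD ' ' ∈ (['N', 'S', 'W', 'E'] : List Char) ∧
     (PySem.List.pyGet? r.toList 2).getD ' ' ∈
       (['0', '1', '2', '3', '4', '5', '6', '7', '8', '9'] : List Char))
instance (park : List String) (routes : List String) : Decidable (Pre_solution park routes) := by
  unfold Pre_solution; infer_instance

def pvWitness_solution : List String × List String := (["SO", "OO"], ["E 1", "S 1"])

def Spec_solution (park : List String) (routes : List String) (out : List Int) : Prop := out = solution_alt park routes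
instance (park : List String) (routes : List String) (out : List Int) : Decidable (Spec_solution park routes out) := by unfold Spec_solution; infer_instance

-- ===== CLAIM (what is proved, stated in full; the proofs are below) =====
def Claim_equal_solution : Prop := ∀ (park : List String) (routes : List String), Dom_solution park routes → Pre_solution park routes → Spec_solution park routes (solution park routes)

-- ===== LEMMAS AND PROOFS =====

theorem solution_witness_ok :
    Dom_solution pvWitness_solution.1 pvWitness_solution.2 ∧
    Pre_solution pvWitness_solution.1 pvWitness_solution.2 := by decide

-- a position that both programs may stand on: in bounds and not a wall
abbrev pvOk (park : List String) (W H : Nat) (a b : Int) : Prop :=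
  0 ≤ a ∧ a < (W : Int) ∧ 0 ≤ b ∧ b < (H : Int) ∧ pvCell park a b ≠ 'X'

theorem pvParse_digit (r : String)
    (h : (PySem.List.pyGet? r.toList 2).getD ' ' ∈
      (['0', '1', '2', '3', '4', '5', '6', '7', '8', '9'] : List Char)) :
    0 ≤ pvParse r := by
  unfold pvParse
  simp only [List.mem_cons, List.not_mem_nil, or_false] at h
  rcases h with h | h | h | h | h | h | h | h | h | h <;> rw [h] <;> decide

theorem pvWalk_some (park : List String) (W H : Nat) (dx dy : Int) :
    ∀ (n : Nat) (x y : Int),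
      (∀ k : Nat, 1 ≤ k → k ≤ n → pvOk park W H (x + dx * k) (y + dy * k)) →
      pvWalk park W H dx dy x y n = some (x + dx * n, y + dy * n) := by
  intro n
  induction n with
  | zero => intro x y _; simp [pvWalk]
  | succ n ih =>
    intro x y h
    have h1 := h 1 le_rfl (by omega)
    simp only [Nat.cast_one, mul_one] at h1
    have hrec : ∀ k : Nat, 1 ≤ k → k ≤ n →
        pvOk park W H ((x + dx) + dx * k) ((y + dy) + dy * k) := by
      intro k hk1 hk2
      have h2 := h (k + 1) (by omega) (by omega)
      have e1 : x + dx * ((k : Int) + 1) = (x + dx) + dx * k := by ring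
      have e2 : y + dy * ((k : Int) + 1) = (y + dy) + dy * k := by ring
      push_cast at h2
      rw [e1, e2] at h2
      exact h2
    have hw := ih (x + dx) (y + dy) hrec
    simp only [pvWalk]
    rw [if_pos ⟨h1.1, h1.2.1, h1.2.2.1, h1.2.2.2.1⟩, if_neg (by simpa using h1.2.2.2.2), hw]
    simp only [Option.some.injEq, Prod.mk.injEq]
    constructor <;> push_cast <;> ring

theorem pvWalk_none (park : List String) (W H : Nat) (dx dy : Int) :
    ∀ (n : Nat) (x y : Int),
      ¬ (∀ k : Nat, 1 ≤ k → k ≤ n → pvOk park W H (x + dx * k) (y + dy * k)) →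
      pvWalk park W H dx dy x y n = none := by
  intro n
  induction n with
  | zero => intro x y h; exact absurd (by intro k hk1 hk2; omega) h
  | succ n ih =>
    intro x y h
    by_cases h1 : pvOk park W H (x + dx) (y + dy)
    · have hrec : ¬ ∀ k : Nat, 1 ≤ k → k ≤ n →
          pvOk park W H ((x + dx) + dx * k) ((y + dy) + dy * k) := by
        intro hall
        apply h
        intro k hk1 hk2
        rcases Nat.eq_or_lt_of_le hk1 with he | hl
        · simpa [← he] using h1
        · have h2 := hall (k - 1) (by omega) (by omega)
          have hc : ((k - 1 : Nat) : Int) = (k : Int) - 1 := by omega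
          rw [hc] at h2
          have e1 : (x + dx) + dx * ((k : Int) - 1) = x + dx * k := by ring
          have e2 : (y + dy) + dy * ((k : Int) - 1) = y + dy * k := by ring
          rw [e1, e2] at h2
          exact h2
      have hw := ih (x + dx) (y + dy) hrec
      simp only [pvWalk]
      rw [if_pos ⟨h1.1, h1.2.1, h1.2.2.1, h1.2.2.2.1⟩, if_neg (by simpa using h1.2.2.2.2), hw]
    · simp only [pvWalk]
      by_cases hb : 0 ≤ x + dx ∧ x + dx < (W : Int) ∧ 0 ≤ y + dy ∧ y + dy < (H : Int)
      · rw [if_pos hb, if_pos]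
        by_contra hc
        exact h1 ⟨hb.1, hb.2.1, hb.2.2.1, hb.2.2.2, hc⟩
      · rw [if_neg hb]

theorem all_range_iff (a b : Int) (f : Int → Bool) :
    (PySem.List.pyRange a b 1).all f = true ↔ ∀ c : Int, a ≤ c → c < b → f c = true := by
  simp [List.all_eq_true, PySem.List.mem_pyRange_one]

theorem pvDirE (park : List String) (W H : Nat) (x y s : Int) (hs0 : 0 ≤ s)
    (hp : pvOk park W H x y) :
    ((0 ≤ x + 0 * s ∧ x + 0 * s < (W : Int) ∧ 0 ≤ y + 1 * s ∧ y + 1 * s < (H : Int)) ∧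
        pvPromising x y (x + 0 * s) (y + 1 * s) park = true) ↔
      ∀ k : Nat, 1 ≤ k → k ≤ s.toNat → pvOk park W H (x + 0 * (k : Int)) (y + 1 * (k : Int)) := by
  simp only [zero_mul, add_zero, one_mul]
  unfold pvPromising
  rw [if_pos rfl, min_eq_left (by omega), max_eq_right (by omega), all_range_iff]
  constructor
  · rintro ⟨⟨_, _, _, hyH⟩, hall⟩ k hk1 hk2
    refine ⟨hp.1, hp.2.1, by omega, by omega, ?_⟩
    have := hall (y + (k : Int)) (by omega) (by omega)
    simpa using this
  · intro hall
    have hend : pvOk park W H x (y + s) := by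
      by_cases hs : s = 0
      · subst hs; simpa using hp
      · have h2 := hall s.toNat (by omega) le_rfl
        have hc : ((s.toNat : Nat) : Int) = s := Int.toNat_of_nonneg hs0
        rw [hc] at h2; exact h2
    refine ⟨⟨hp.1, hp.2.1, by omega, hend.2.2.2.1⟩, ?_⟩
    intro c hc1 hc2
    rcases eq_or_lt_of_le hc1 with he | hl
    · simpa [← he] using hp.2.2.2.2
    · have hk := hall (c - y).toNat (by omega) (by omega)
      have hc3 : y + ((c - y).toNat : Int) = c := by omega
      rw [hc3] at hk
      simpa using hk.2.2.2.2


theorem pvDirW (park : List String) (W H : Nat) (x y s : Int) (hs0 : 0 ≤ s)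
    (hp : pvOk park W H x y) :
    ((0 ≤ x + 0 * s ∧ x + 0 * s < (W : Int) ∧ 0 ≤ y + (-1) * s ∧ y + (-1) * s < (H : Int)) ∧
        pvPromising x y (x + 0 * s) (y + (-1) * s) park = true) ↔
      ∀ k : Nat, 1 ≤ k → k ≤ s.toNat → pvOk park W H (x + 0 * (k : Int)) (y + (-1) * (k : Int)) := by
  simp only [zero_mul, add_zero, neg_mul, one_mul]
  unfold pvPromising
  rw [if_pos rfl, min_eq_right (by omega), max_eq_left (by omega), all_range_iff]
  constructor
  · rintro ⟨⟨_, _, hy0, _⟩, hall⟩ k hk1 hk2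
    refine ⟨hp.1, hp.2.1, by omega, by omega, ?_⟩
    have := hall (y + -(k : Int)) (by omega) (by omega)
    simpa using this
  · intro hall
    have hend : pvOk park W H x (y + -s) := by
      by_cases hs : s = 0
      · subst hs; simpa using hp
      · have h2 := hall s.toNat (by omega) le_rfl
        have hc : ((s.toNat : Nat) : Int) = s := Int.toNat_of_nonneg hs0
        rw [hc] at h2; exact h2
    obtain ⟨_, _, h3, _, _⟩ := hend
    refine ⟨⟨hp.1, hp.2.1, by omega, by omega⟩, ?_⟩
    intro c hc1 hc2
    rcases eq_or_lt_of_le (show c ≤ y by omega) with he | hl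
    · simpa [he] using hp.2.2.2.2
    · have hk := hall (y - c).toNat (by omega) (by omega)
      have hc3 : y + -((y - c).toNat : Int) = c := by omega
      rw [hc3] at hk
      simpa using hk.2.2.2.2

theorem pvDirN (park : List String) (W H : Nat) (x y s : Int) (hs0 : 0 ≤ s)
    (hp : pvOk park W H x y) :
    ((0 ≤ x + (-1) * s ∧ x + (-1) * s < (W : Int) ∧ 0 ≤ y + 0 * s ∧ y + 0 * s < (H : Int)) ∧
        pvPromising x y (x + (-1) * s) (y + 0 * s) park = true) ↔
      ∀ k : Nat, 1 ≤ k → k ≤ s.toNat → pvOk park W H (x + (-1) * (k : Int)) (y + 0 * (k : Int)) := by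
  simp only [zero_mul, add_zero, neg_mul, one_mul]
  by_cases hs : s = 0
  · subst hs
    simp only [neg_zero, add_zero, Int.toNat_zero]
    constructor
    · intro _ k hk1 hk2; omega
    · intro _
      refine ⟨⟨hp.1, hp.2.1, hp.2.2.1, hp.2.2.2.1⟩, ?_⟩
      unfold pvPromising
      rw [if_pos rfl, min_self, max_self, all_range_iff]
      intro c hc1 hc2
      have he : c = y := by omega
      simpa [he] using hp.2.2.2.2
  · unfold pvPromising
    rw [if_neg (by omega), min_eq_right (by omega), max_eq_left (by omega), all_range_iff]
    constructor
    · rintro ⟨⟨hx0, _, _, _⟩, hall⟩ k hk1 hk2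
      refine ⟨by omega, by omega, hp.2.2.1, hp.2.2.2.1, ?_⟩
      have := hall (x + -(k : Int)) (by omega) (by omega)
      simpa using this
    · intro hall
      have hend : pvOk park W H (x + -s) y := by
        have h2 := hall s.toNat (by omega) le_rfl
        have hc : ((s.toNat : Nat) : Int) = s := Int.toNat_of_nonneg hs0
        rw [hc] at h2; exact h2
      obtain ⟨h1, _, _, _, _⟩ := hend
      refine ⟨⟨by omega, by omega, hp.2.2.1, hp.2.2.2.1⟩, ?_⟩
      intro c hc1 hc2
      rcases eq_or_lt_of_le (show c ≤ x by omega) with he | hl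
      · simpa [he] using hp.2.2.2.2
      · have hk := hall (x - c).toNat (by omega) (by omega)
        have hc3 : x + -((x - c).toNat : Int) = c := by omega
        rw [hc3] at hk
        simpa using hk.2.2.2.2

theorem pvDirS (park : List String) (W H : Nat) (x y s : Int) (hs0 : 0 ≤ s)
    (hp : pvOk park W H x y) :
    ((0 ≤ x + 1 * s ∧ x + 1 * s < (W : Int) ∧ 0 ≤ y + 0 * s ∧ y + 0 * s < (H : Int)) ∧
        pvPromising x y (x + 1 * s) (y + 0 * s) park = true) ↔
      ∀ k : Nat, 1 ≤ k → k ≤ s.toNat → pvOk park W H (x + 1 * (k : Int)) (y + 0 * (k : Int)) := by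
  simp only [zero_mul, add_zero, one_mul]
  by_cases hs : s = 0
  · subst hs
    simp only [add_zero, Int.toNat_zero]
    constructor
    · intro _ k hk1 hk2; omega
    · intro _
      refine ⟨⟨hp.1, hp.2.1, hp.2.2.1, hp.2.2.2.1⟩, ?_⟩
      unfold pvPromising
      rw [if_pos rfl, min_self, max_self, all_range_iff]
      intro c hc1 hc2
      have he : c = y := by omega
      simpa [he] using hp.2.2.2.2
  · unfold pvPromising
    rw [if_neg (by omega), min_eq_left (by omega), max_eq_right (by omega), all_range_iff]
    constructor
    · rintro ⟨⟨_, hxW, _, _⟩, hall⟩ k hk1 hk2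
      refine ⟨by omega, by omega, hp.2.2.1, hp.2.2.2.1, ?_⟩
      have := hall (x + (k : Int)) (by omega) (by omega)
      simpa using this
    · intro hall
      have hend : pvOk park W H (x + s) y := by
        have h2 := hall s.toNat (by omega) le_rfl
        have hc : ((s.toNat : Nat) : Int) = s := Int.toNat_of_nonneg hs0
        rw [hc] at h2; exact h2
      obtain ⟨_, h2, _, _, _⟩ := hend
      refine ⟨⟨by omega, by omega, hp.2.2.1, hp.2.2.2.1⟩, ?_⟩
      intro c hc1 hc2
      rcases eq_or_lt_of_le hc1 with he | hl
      · simpa [← he] using hp.2.2.2.2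
      · have hk := hall (c - x).toNat (by omega) (by omega)
        have hc3 : x + ((c - x).toNat : Int) = c := by omega
        rw [hc3] at hk
        simpa using hk.2.2.2.2

theorem pvGlue (park : List String) (W H : Nat) (x y s dx dy : Int) (hs0 : 0 ≤ s)
    (hp : pvOk park W H x y)
    (hiff : ((0 ≤ x + dx * s ∧ x + dx * s < (W : Int) ∧ 0 ≤ y + dy * s ∧ y + dy * s < (H : Int)) ∧
        pvPromising x y (x + dx * s) (y + dy * s) park = true) ↔
      ∀ k : Nat, 1 ≤ k → k ≤ s.toNat → pvOk park W H (x + dx * (k : Int)) (y + dy * (k : Int))) :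
    (match pvWalk park W H dx dy x y s.toNat with
      | some q => q
      | none => (x, y)) =
      (if 0 ≤ x + dx * s ∧ x + dx * s < (W : Int) ∧ 0 ≤ y + dy * s ∧ y + dy * s < (H : Int) then
        if pvPromising x y (x + dx * s) (y + dy * s) park then (x + dx * s, y + dy * s)
        else (x, y)
      else (x, y)) ∧
      pvOk park W H
        ((if 0 ≤ x + dx * s ∧ x + dx * s < (W : Int) ∧ 0 ≤ y + dy * s ∧ y + dy * s < (H : Int) then
          if pvPromising x y (x + dx * s) (y + dy * s) park then (x + dx * s, y + dy * s)
          else (x, y)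
        else (x, y)).1)
        ((if 0 ≤ x + dx * s ∧ x + dx * s < (W : Int) ∧ 0 ≤ y + dy * s ∧ y + dy * s < (H : Int) then
          if pvPromising x y (x + dx * s) (y + dy * s) park then (x + dx * s, y + dy * s)
          else (x, y)
        else (x, y)).2) := by
  have hc : ((s.toNat : Nat) : Int) = s := Int.toNat_of_nonneg hs0
  by_cases hA : ∀ k : Nat, 1 ≤ k → k ≤ s.toNat → pvOk park W H (x + dx * (k : Int)) (y + dy * (k : Int))
  · have hcond := hiff.mpr hA
    have hw := pvWalk_some park W H dx dy s.toNat x y hA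
    have hend : pvOk park W H (x + dx * s) (y + dy * s) := by
      by_cases hs : s = 0
      · subst hs; simpa using hp
      · have h2 := hA s.toNat (by omega) le_rfl
        rw [hc] at h2; exact h2
    rw [if_pos hcond.1, if_pos hcond.2, hw, hc]
    exact ⟨rfl, hend⟩
  · have hw := pvWalk_none park W H dx dy s.toNat x y hA
    have hnc : ¬ ((0 ≤ x + dx * s ∧ x + dx * s < (W : Int) ∧ 0 ≤ y + dy * s ∧ y + dy * s < (H : Int)) ∧
        pvPromising x y (x + dx * s) (y + dy * s) park = true) := fun hcond => hA (hiff.mp hcond)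
    rw [hw]
    split_ifs with h1 h2
    · exact absurd ⟨h1, h2⟩ hnc
    · exact ⟨rfl, hp⟩
    · exact ⟨rfl, hp⟩

set_option maxHeartbeats 1000000 in
theorem pvStep_core (park : List String) (W H : Nat) (d : Char) (s : Int) (x y : Int)
    (hs0 : 0 ≤ s) (hd : d ∈ (['N', 'S', 'W', 'E'] : List Char)) (hp : pvOk park W H x y) :
    (match pvWalk park W H (pvDeltas d).1 (pvDeltas d).2 x y s.toNat with
      | some q => q
      | none => (x, y)) =
      (if 0 ≤ x + (pvDic d).1 * s ∧ x + (pvDic d).1 * s < (W : Int) ∧ 0 ≤ y + (pvDic d).2 * s ∧ y + (pvDic d).2 * s < (H : Int) then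
        if pvPromising x y (x + (pvDic d).1 * s) (y + (pvDic d).2 * s) park then (x + (pvDic d).1 * s, y + (pvDic d).2 * s)
        else (x, y)
      else (x, y)) ∧
      pvOk park W H ((if 0 ≤ x + (pvDic d).1 * s ∧ x + (pvDic d).1 * s < (W : Int) ∧ 0 ≤ y + (pvDic d).2 * s ∧ y + (pvDic d).2 * s < (H : Int) then
        if pvPromising x y (x + (pvDic d).1 * s) (y + (pvDic d).2 * s) park then (x + (pvDic d).1 * s, y + (pvDic d).2 * s)
        else (x, y)
      else (x, y)).1) ((if 0 ≤ x + (pvDic d).1 * s ∧ x + (pvDic d).1 * s < (W : Int) ∧ 0 ≤ y + (pvDic d).2 * s ∧ y + (pvDic d).2 * s < (H : Int) then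
        if pvPromising x y (x + (pvDic d).1 * s) (y + (pvDic d).2 * s) park then (x + (pvDic d).1 * s, y + (pvDic d).2 * s)
        else (x, y)
      else (x, y)).2) := by
  simp only [List.mem_cons, List.not_mem_nil, or_false] at hd
  rcases hd with h | h | h | h <;> subst h
  · rw [show pvDic 'N' = ((-1 : Int), (0 : Int)) from by decide,
        show pvDeltas 'N' = ((-1 : Int), (0 : Int)) from by decide]
    exact pvGlue park W H x y s (-1) 0 hs0 hp (pvDirN park W H x y s hs0 hp)
  · rw [show pvDic 'S' = ((1 : Int), (0 : Int)) from by decide,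
        show pvDeltas 'S' = ((1 : Int), (0 : Int)) from by decide]
    exact pvGlue park W H x y s 1 0 hs0 hp (pvDirS park W H x y s hs0 hp)
  · rw [show pvDic 'W' = ((0 : Int), (-1 : Int)) from by decide,
        show pvDeltas 'W' = ((0 : Int), (-1 : Int)) from by decide]
    exact pvGlue park W H x y s 0 (-1) hs0 hp (pvDirW park W H x y s hs0 hp)
  · rw [show pvDic 'E' = ((0 : Int), (1 : Int)) from by decide,
        show pvDeltas 'E' = ((0 : Int), (1 : Int)) from by decide]
    exact pvGlue park W H x y s 0 1 hs0 hp (pvDirE park W H x y s hs0 hp)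

theorem pvStep_eq (park : List String) (W H : Nat) (r : String) (p : Int × Int)
    (hp : pvOk park W H p.1 p.2)
    (hd : (PySem.List.pyGet? r.toList 0).getD ' ' ∈ (['N', 'S', 'W', 'E'] : List Char))
    (hs : (PySem.List.pyGet? r.toList 2).getD ' ' ∈
      (['0', '1', '2', '3', '4', '5', '6', '7', '8', '9'] : List Char)) :
    pvStepB park W H p r = pvStepA park W H p r ∧
      pvOk park W H (pvStepA park W H p r).1 (pvStepA park W H p r).2 := by
  obtain ⟨x, y⟩ := p
  exact pvStep_core park W H ((PySem.List.pyGet? r.toList 0).getD ' ') (pvParse r) x y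
    (pvParse_digit r hs) hd hp

theorem pvScan_sticky (park : List String) (i : Int) :
    ∀ (l : List Nat) (v : Int), l.foldl (pvScanStep park i) (some v) = some v := by
  intro l
  induction l with
  | nil => intro v; rfl
  | cons a l ih => intro v; simpa [pvScanStep] using ih v

theorem pvScan_aux_some (park : List String) (i : Int) :
    ∀ (l : List Nat) (acc : Option Int) (v : Int),
      l.foldl (pvScanStep park i) acc = some v →
      (∃ w, acc = some w ∧ v = w) ∨
        ∃ jn ∈ l, v = (jn : Int) ∧ pvCell park i (jn : Int) = 'S' := by
  intro l
  induction l with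
  | nil => intro acc v h; exact .inl ⟨v, h, rfl⟩
  | cons a l ih =>
    intro acc v h
    simp only [List.foldl_cons] at h
    cases acc with
    | some w =>
      rw [show pvScanStep park i (some w) a = some w from rfl, pvScan_sticky] at h
      exact .inl ⟨w, rfl, by simpa using h.symm⟩
    | none =>
      by_cases hc : pvCell park i (a : Int) = 'S'
      · rw [show pvScanStep park i none a = some (a : Int) from by simp [pvScanStep, hc],
          pvScan_sticky] at h
        exact .inr ⟨a, List.mem_cons_self, by simpa using h.symm, hc⟩
      · rw [show pvScanStep park i none a = none from by simp [pvScanStep, hc]] at h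
        rcases ih none v h with ⟨w, hw, _⟩ | ⟨jn, hjn, h1, h2⟩
        · exact absurd hw (by simp)
        · exact .inr ⟨jn, List.mem_cons_of_mem a hjn, h1, h2⟩

theorem pvRowScan_some (park : List String) (i : Int) (H : Nat) (v : Int)
    (h : pvRowScan park i H = some v) :
    ∃ jn : Nat, jn < H ∧ v = (jn : Int) ∧ pvCell park i (jn : Int) = 'S' := by
  rcases pvScan_aux_some park i (List.range H) none v h with ⟨w, hw, _⟩ | ⟨jn, hjn, h1, h2⟩
  · exact absurd hw (by simp)
  · exact ⟨jn, List.mem_range.mp hjn, h1, h2⟩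

theorem pvRowScan_none (park : List String) (i : Int) (H : Nat)
    (h : pvRowScan park i H = none) :
    ∀ a ∈ List.range H, pvCell park i (a : Int) ≠ 'S' := by
  unfold pvRowScan at h
  revert h
  generalize List.range H = l
  induction l with
  | nil => intro _ a ha; simp at ha
  | cons a l ih =>
    intro h b hb
    simp only [List.foldl_cons] at h
    by_cases hc : pvCell park i (a : Int) = 'S'
    · rw [show pvScanStep park i none a = some (a : Int) from by simp [pvScanStep, hc],
        pvScan_sticky] at h
      exact absurd h (by simp)
    · rw [show pvScanStep park i none a = none from by simp [pvScanStep, hc]] at h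
      rcases List.mem_cons.mp hb with rfl | hb
      · exact hc
      · exact ih h b hb

-- the state of the outer 'S' scan once some row with an 'S' has been recorded
abbrev pvGoodS (park : List String) (W H : Nat) (p : Int × Int) : Prop :=
  0 ≤ p.1 ∧ p.1 < (W : Int) ∧ 0 ≤ p.2 ∧ p.2 < (H : Int) ∧ pvCell park p.1 p.2 = 'S'

theorem pvFind_preserve (park : List String) (W H : Nat) :
    ∀ (l : List Nat) (acc : Int × Int), (∀ a ∈ l, a < W) → pvGoodS park W H acc →
      pvGoodS park W H (l.foldl (pvFindStep park H) acc) := by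
  intro l
  induction l with
  | nil => intro acc _ h; exact h
  | cons a l ih =>
    intro acc hl hacc
    simp only [List.foldl_cons]
    apply ih _ (fun b hb => hl b (List.mem_cons_of_mem a hb))
    unfold pvFindStep
    cases hsc : pvRowScan park (a : Int) H with
    | none => exact hacc
    | some j =>
      obtain ⟨jn, hjn, rfl, hcell⟩ := pvRowScan_some park (a : Int) H j hsc
      have haW : a < W := hl a List.mem_cons_self
      show 0 ≤ ((a : Nat) : Int) ∧ ((a : Nat) : Int) < (W : Int) ∧ 0 ≤ ((jn : Nat) : Int) ∧
        ((jn : Nat) : Int) < (H : Int) ∧ pvCell park ((a : Nat) : Int) ((jn : Nat) : Int) = 'S'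
      exact ⟨by omega, by omega, by omega, by omega, hcell⟩

theorem pvFind_establish (park : List String) (W H : Nat) :
    ∀ (l : List Nat) (acc : Int × Int), (∀ a ∈ l, a < W) →
      (∃ a ∈ l, pvRowScan park (a : Int) H ≠ none) →
      pvGoodS park W H (l.foldl (pvFindStep park H) acc) := by
  intro l
  induction l with
  | nil => intro acc _ h; simp at h
  | cons a l ih =>
    intro acc hl hex
    simp only [List.foldl_cons]
    cases hsc : pvRowScan park (a : Int) H with
    | some j =>
      apply pvFind_preserve park W H l _ (fun b hb => hl b (List.mem_cons_of_mem a hb))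
      unfold pvFindStep
      rw [hsc]
      obtain ⟨jn, hjn, rfl, hcell⟩ := pvRowScan_some park (a : Int) H j hsc
      have haW : a < W := hl a List.mem_cons_self
      show 0 ≤ ((a : Nat) : Int) ∧ ((a : Nat) : Int) < (W : Int) ∧ 0 ≤ ((jn : Nat) : Int) ∧
        ((jn : Nat) : Int) < (H : Int) ∧ pvCell park ((a : Nat) : Int) ((jn : Nat) : Int) = 'S'
      exact ⟨by omega, by omega, by omega, by omega, hcell⟩
    | none =>
      apply ih _ (fun b hb => hl b (List.mem_cons_of_mem a hb))
      rcases hex with ⟨b, hb, hbne⟩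
      rcases List.mem_cons.mp hb with rfl | hb
      · exact absurd hsc hbne
      · exact ⟨b, hb, hbne⟩

theorem pvFind_id (park : List String) (H : Nat) :
    ∀ (l : List Nat) (acc : Int × Int), (∀ a ∈ l, pvRowScan park (a : Int) H = none) →
      l.foldl (pvFindStep park H) acc = acc := by
  intro l
  induction l with
  | nil => intro acc _; rfl
  | cons a l ih =>
    intro acc hl
    simp only [List.foldl_cons]
    rw [show pvFindStep park H acc a = acc from by
      unfold pvFindStep; rw [hl a List.mem_cons_self]]
    exact ih acc (fun b hb => hl b (List.mem_cons_of_mem a hb))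

theorem pvCell_eq (park : List String) (i j : Nat) (hi : i < park.length)
    (hj : j < (park[i]).toList.length) :
    pvCell park (i : Int) (j : Int) = (park[i]).toList[j] := by
  unfold pvCell
  simp only [PySem.List.pyGet?_natCast, List.getElem?_eq_getElem hi, Option.getD_some]
  rw [List.getElem?_eq_getElem hj]
  rfl

theorem pvH_eq (park : List String) (h : park ≠ []) :
    ((PySem.List.pyGet? park 0).getD "").toList.length = (park.headD "").toList.length := by
  cases park with
  | nil => exact absurd rfl h
  | cons r0 t => rw [PySem.List.pyGet?_zero_cons]; rfl

theorem pvCell00 (park : List String) (h : park ≠ []) :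
    pvCell park 0 0 = (park.headD "").toList.headD ' ' := by
  cases park with
  | nil => exact absurd rfl h
  | cons r0 t =>
    unfold pvCell
    rw [PySem.List.pyGet?_zero_cons]
    simp only [Option.getD_some, List.headD]
    rw [PySem.List.pyGet?_zero]
    cases r0.toList <;> rfl

theorem pvStepA_H0_core (park : List String) (W : Nat) (d : Char) (s : Int) :
    (if 0 ≤ (0 : Int) + (pvDic d).1 * s ∧ (0 : Int) + (pvDic d).1 * s < (W : Int) ∧
        0 ≤ (0 : Int) + (pvDic d).2 * s ∧ (0 : Int) + (pvDic d).2 * s < ((0 : Nat) : Int) then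
      if pvPromising 0 0 ((0 : Int) + (pvDic d).1 * s) ((0 : Int) + (pvDic d).2 * s) park then
        ((0 : Int) + (pvDic d).1 * s, (0 : Int) + (pvDic d).2 * s)
      else ((0 : Int), (0 : Int))
    else ((0 : Int), (0 : Int))) = (0, 0) := by
  rw [if_neg]
  rintro ⟨-, -, h3, h4⟩
  omega

theorem pvStepA_H0 (park : List String) (W : Nat) (r : String) :
    pvStepA park W 0 (0, 0) r = (0, 0) :=
  pvStepA_H0_core park W ((PySem.List.pyGet? r.toList 0).getD ' ') (pvParse r)

theorem pvStepB_H0_core (park : List String) (W : Nat) (d : Char) (s : Int) :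
    (match pvWalk park W 0 (pvDeltas d).1 (pvDeltas d).2 0 0 s.toNat with
      | some q => q
      | none => ((0 : Int), (0 : Int))) = (0, 0) := by
  cases hn : s.toNat with
  | zero => rfl
  | succ n =>
    simp only [pvWalk]
    rw [if_neg (by rintro ⟨-, -, h3, h4⟩; omega)]

theorem pvStepB_H0 (park : List String) (W : Nat) (r : String) :
    pvStepB park W 0 (0, 0) r = (0, 0) :=
  pvStepB_H0_core park W ((PySem.List.pyGet? r.toList 0).getD ' ') (pvParse r)

theorem pvFoldConst (f : Int × Int → String → Int × Int) (c : Int × Int)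
    (l : List String) (h : ∀ r ∈ l, f c r = c) : l.foldl f c = c := by
  induction l with
  | nil => rfl
  | cons a l ih =>
    simp only [List.foldl_cons, h a List.mem_cons_self]
    exact ih (fun r hr => h r (List.mem_cons_of_mem a hr))

theorem pvFold_eq (park : List String) (W H : Nat) :
    ∀ (routes : List String) (p : Int × Int),
      (∀ r ∈ routes, 3 ≤ r.toList.length ∧
        (PySem.List.pyGet? r.toList 0).getD ' ' ∈ (['N', 'S', 'W', 'E'] : List Char) ∧
        (PySem.List.pyGet? r.toList 2).getD ' ' ∈
          (['0', '1', '2', '3', '4', '5', '6', '7', '8', '9'] : List Char)) →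
      pvOk park W H p.1 p.2 →
      routes.foldl (pvStepB park W H) p = routes.foldl (pvStepA park W H) p := by
  intro routes
  induction routes with
  | nil => intro p _ _; rfl
  | cons r l ih =>
    intro p hl hp
    obtain ⟨heq, hok⟩ := pvStep_eq park W H r p hp (hl r List.mem_cons_self).2.1
      (hl r List.mem_cons_self).2.2
    simp only [List.foldl_cons, heq]
    exact ih (pvStepA park W H p r) (fun r' hr' => hl r' (List.mem_cons_of_mem r hr')) hok


theorem pvMain (park routes : List String) (hpre : Pre_solution park routes) :
    solution park routes = solution_alt park routes := by
  obtain ⟨hne, hrect, hstart, hroutes⟩ := hpre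
  simp only [solution, solution_alt]
  set W := park.length with hWdef
  set H := ((PySem.List.pyGet? park 0).getD "").toList.length with hHdef
  suffices h : routes.foldl (pvStepB park W H) (pvFindS park W H) =
      routes.foldl (pvStepA park W H) (pvFindS park W H) by rw [h]
  by_cases hnil : routes = []
  · subst hnil; rfl
  by_cases hH : H = 0
  · have hfind : pvFindS park W 0 = (0, 0) :=
      pvFind_id park 0 (List.range W) (0, 0) (fun a _ => rfl)
    rw [hH, hfind,
      pvFoldConst (pvStepB park W 0) (0, 0) routes (fun r _ => pvStepB_H0 park W r),
      pvFoldConst (pvStepA park W 0) (0, 0) routes (fun r _ => pvStepA_H0 park W r)]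
  · have hok : pvOk park W H (pvFindS park W H).1 (pvFindS park W H).2 := by
      by_cases hS : ∃ r ∈ park, 'S' ∈ r.toList.take ((park.headD "").toList.length)
      · obtain ⟨r, hr, hSr⟩ := hS
        obtain ⟨i, hi, rfl⟩ := List.getElem_of_mem hr
        obtain ⟨j, hj, hSj⟩ := List.getElem_of_mem hSr
        have h1 := hrect park[i] (List.getElem_mem hi)
        have h2 := pvH_eq park hne
        have hlt : j < (park[i]).toList.length := by
          simp only [List.length_take] at hj
          omega
        have hjH : j < H := by
          simp only [List.length_take] at hj
          omega
        rw [List.getElem_take] at hSj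
        have hgood : pvGoodS park W H (pvFindS park W H) := by
          apply pvFind_establish park W H (List.range W) (0, 0)
            (fun a ha => List.mem_range.mp ha)
          refine ⟨i, List.mem_range.mpr hi, ?_⟩
          intro hnone
          have hall := pvRowScan_none park (i : Int) H hnone j (List.mem_range.mpr hjH)
          exact hall (by rw [pvCell_eq park i j hi hlt]; exact hSj)
        obtain ⟨g1, g2, g3, g4, g5⟩ := hgood
        exact ⟨g1, g2, g3, g4, by rw [g5]; decide⟩
      · have hnoneAll : ∀ a ∈ List.range W, pvRowScan park (a : Int) H = none := by
          intro a ha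
          cases hsc : pvRowScan park (a : Int) H with
          | none => rfl
          | some v =>
            obtain ⟨jn, hjn, -, hcell⟩ := pvRowScan_some park (a : Int) H v hsc
            have haW : a < W := List.mem_range.mp ha
            have hlen : H ≤ (park[a]).toList.length := by
              have h1 := hrect park[a] (List.getElem_mem haW)
              have h2 := pvH_eq park hne
              omega
            rw [pvCell_eq park a jn haW (by omega)] at hcell
            have hmem : 'S' ∈ (park[a]).toList.take ((park.headD "").toList.length) := by
              have h2 := pvH_eq park hne
              have hjn' : jn < ((park[a]).toList.take ((park.headD "").toList.length)).length := by
                simp only [List.length_take]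
                omega
              have := List.getElem_mem hjn'
              rwa [List.getElem_take, hcell] at this
            exact absurd ⟨park[a], List.getElem_mem haW, hmem⟩ hS
        have hfind : pvFindS park W H = (0, 0) :=
          pvFind_id park H (List.range W) (0, 0) hnoneAll
        rw [hfind]
        have hW0 : 0 < W := List.length_pos_iff.mpr hne
        show 0 ≤ (0 : Int) ∧ (0 : Int) < (W : Int) ∧ 0 ≤ (0 : Int) ∧ (0 : Int) < (H : Int) ∧
          pvCell park 0 0 ≠ 'X'
        refine ⟨le_refl 0, by omega, le_refl 0, by omega, ?_⟩
        rw [pvCell00 park hne]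
        rcases hstart with h | h | h
        · exact absurd h hS
        · exact h
        · exact absurd h hnil
    exact pvFold_eq park W H routes (pvFindS park W H) hroutes hok


-- ===== VERDICT (by name: the statement is the Claim_ definition above) =====
theorem solution_spec : Claim_equal_solution := by
  intro park routes _ hpre
  unfold Spec_solution
  exact pvMain park routes hpre
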